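-- pv_equiv track=rewrite | github.com/LeonardoMartinezC/Proyecto_Ventas | pages/filtrado.py | cambiar_abreviaturas_ventas
-- ===== SOURCE A (Python) =====
-- def cambiar_abreviaturas_ventas( E, DC):
--         #Cambiar los estados por sus abreviaturas
--         i = 0
--         clientes = []
--         abreviaturas = []
--         LISTA_FI = []
--         for ESTADO in E:
--             abreviaturas.append(list(E[ESTADO]))
--         for CLIENTES in  DC:
--             clientes.append(list(DC[CLIENTES]))
--
--         TAMANO1 = len(clientes[0])
--         TAMANO2 = len(abreviaturas[0])
--
--         # Dejar las abrevisturas que si se necesitan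
--         for i in range(TAMANO1):
--             for j in range(TAMANO2):
--                 if(clientes[0][i] == abreviaturas[0][j]):
--                     LISTA_FI.append(abreviaturas[1][j])
--
--         clientes.append(LISTA_FI)
--
--         diccionario_Clientes = {
--                             'Estado':clientes[0],
--                             'Ventas':clientes[1],
--                             'abreviatura':clientes[2]
--         }
--
--
--         return diccionario_Clientes
-- ===== SOURCE B (Python) =====
-- def cambiar_abreviaturas_ventas(E, DC):
--     # Transpose the dicts into column lists, then group abbreviations by state
--     # name in one dict pass, so the inner scan over abreviaturas disappears.
--     abreviaturas = [list(E[k]) for k in E]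
--     clientes = [list(DC[k]) for k in DC]
--     index = {}
--     for name, ab in zip(abreviaturas[0], abreviaturas[1]):
--         index.setdefault(name, []).append(ab)
--     LISTA_FI = []
--     for estado in clientes[0]:
--         LISTA_FI.extend(index.get(estado, []))
--     clientes.append(LISTA_FI)
--     return {'Estado': clientes[0],
--             'Ventas': clientes[1],
--             'abreviatura': clientes[2]}
-- ===== Notes on version B (the rewrite author's own statement) =====
-- stated objective: alternative
-- what changed: Replaced the nested scan (every client state against every abbreviation row) by a dict grouping abbreviations by state name built in one pass, followed by a single lookup pass over the client states; columns are built by comprehensions instead of append loops.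
import Mathlib
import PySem

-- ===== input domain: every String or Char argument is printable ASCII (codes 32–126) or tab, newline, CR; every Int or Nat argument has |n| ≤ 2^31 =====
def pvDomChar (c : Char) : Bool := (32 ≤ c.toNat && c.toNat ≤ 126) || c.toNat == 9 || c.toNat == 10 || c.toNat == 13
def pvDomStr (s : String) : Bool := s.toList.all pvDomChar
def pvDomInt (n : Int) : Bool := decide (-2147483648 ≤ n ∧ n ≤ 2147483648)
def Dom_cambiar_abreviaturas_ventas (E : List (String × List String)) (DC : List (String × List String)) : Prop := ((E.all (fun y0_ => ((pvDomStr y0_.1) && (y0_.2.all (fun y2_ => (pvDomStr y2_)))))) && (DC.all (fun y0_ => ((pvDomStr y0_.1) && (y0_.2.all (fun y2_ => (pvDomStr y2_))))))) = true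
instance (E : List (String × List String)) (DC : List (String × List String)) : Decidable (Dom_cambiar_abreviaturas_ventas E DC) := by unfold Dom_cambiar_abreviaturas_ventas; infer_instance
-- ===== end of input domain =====

-- ===== PORT A =====
-- Port of A: explicit append loops building the column lists, then the nested
-- index loops over range(TAMANO1) x range(TAMANO2).
def cambiar_abreviaturas_ventas (E : List (String × List String)) (DC : List (String × List String)) : List (String × List String) :=
  let abreviaturas := E.foldl (fun acc kv => acc ++ [(PySem.Dict.mk E).getD kv.1 []]) []
  let clientes := DC.foldl (fun acc kv => acc ++ [(PySem.Dict.mk DC).getD kv.1 []]) []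
  let TAMANO1 := (PySem.List.pyGetD clientes 0 []).length
  let TAMANO2 := (PySem.List.pyGetD abreviaturas 0 []).length
  let LISTA_FI := (PySem.List.pyRange 0 (TAMANO1 : Int) 1).foldl (fun acc i =>
      (PySem.List.pyRange 0 (TAMANO2 : Int) 1).foldl (fun acc2 j =>
        if PySem.List.pyGetD (PySem.List.pyGetD clientes 0 []) i "" = PySem.List.pyGetD (PySem.List.pyGetD abreviaturas 0 []) j "" then
          acc2 ++ [PySem.List.pyGetD (PySem.List.pyGetD abreviaturas 1 []) j ""]
        else acc2) acc) []
  let clientes2 := clientes ++ [LISTA_FI]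
  [("Estado", PySem.List.pyGetD clientes2 0 []),
   ("Ventas", PySem.List.pyGetD clientes2 1 []),
   ("abreviatura", PySem.List.pyGetD clientes2 2 [])]

-- ===== PORT B =====
-- Port of B: column comprehensions, a grouping dict built in one pass over
-- zip(abreviaturas[0], abreviaturas[1]), then one lookup pass over clientes[0].
def cambiar_abreviaturas_ventas_alt (E : List (String × List String)) (DC : List (String × List String)) : List (String × List String) :=
  let abreviaturas := E.map (fun kv => (PySem.Dict.mk E).getD kv.1 [])
  let clientes := DC.map (fun kv => (PySem.Dict.mk DC).getD kv.1 [])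
  let a0 := PySem.List.pyGetD abreviaturas 0 []
  let a1 := PySem.List.pyGetD abreviaturas 1 []
  let index := (a0.zip a1).foldl (fun d p => d.modify p.1 [] (· ++ [p.2])) PySem.Dict.empty
  let c0 := PySem.List.pyGetD clientes 0 []
  let LISTA_FI := c0.foldl (fun acc estado => acc ++ index.getD estado []) []
  let clientes2 := clientes ++ [LISTA_FI]
  [("Estado", PySem.List.pyGetD clientes2 0 []),
   ("Ventas", PySem.List.pyGetD clientes2 1 []),
   ("abreviatura", PySem.List.pyGetD clientes2 2 [])]

-- ===== PRECONDITION & SPEC =====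
-- Pre_ excludes: inputs where A raises IndexError (fewer than 2 columns in DC,
-- empty E, or a client state matching an abbreviation name at a row index past
-- the end of the second E-column); dicts with fewer than 2 columns in E, on which
-- A returns only in the accidental no-match case while B's natural zip raises
-- IndexError; and association lists with duplicate keys, which do not denote a
-- Python dict value (defensible-corner exclusion, no runtime dict has them).
def Pre_cambiar_abreviaturas_ventas (E : List (String × List String)) (DC : List (String × List String)) : Prop :=
  (E.map Prod.fst).Nodup ∧ (DC.map Prod.fst).Nodup ∧ 2 ≤ E.length ∧ 2 ≤ DC.length ∧
  ∀ v ∈ ((E.map Prod.snd).getD 0 []).drop ((E.map Prod.snd).getD 1 []).length,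
    v ∉ (DC.map Prod.snd).getD 0 []
instance (E : List (String × List String)) (DC : List (String × List String)) : Decidable (Pre_cambiar_abreviaturas_ventas E DC) := by unfold Pre_cambiar_abreviaturas_ventas; infer_instance

def pvWitness_cambiar_abreviaturas_ventas : (List (String × List String)) × (List (String × List String)) :=
  ([("Estado", ["CA", "NY"]), ("Abreviatura", ["C.A.", "N.Y."])],
   [("Estado", ["NY", "TX", "CA"]), ("Ventas", ["5", "7", "2"])])

def Spec_cambiar_abreviaturas_ventas (E : List (String × List String)) (DC : List (String × List String)) (out : List (String × List String)) : Prop := out = cambiar_abreviaturas_ventas_alt E DC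
instance (E : List (String × List String)) (DC : List (String × List String)) (out : List (String × List String)) : Decidable (Spec_cambiar_abreviaturas_ventas E DC out) := by unfold Spec_cambiar_abreviaturas_ventas; infer_instance

-- ===== CLAIM (what is proved, stated in full; the proofs are below) =====
def Claim_equal_cambiar_abreviaturas_ventas : Prop := ∀ (E : List (String × List String)) (DC : List (String × List String)), Dom_cambiar_abreviaturas_ventas E DC → Pre_cambiar_abreviaturas_ventas E DC → Spec_cambiar_abreviaturas_ventas E DC (cambiar_abreviaturas_ventas E DC)

-- ===== LEMMAS AND PROOFS =====

-- Transposing a nodup-keyed association list: looking each key up gives back the values.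
theorem pv_cols_eq (L : List (String × List String)) (h : (L.map Prod.fst).Nodup) :
    L.map (fun kv => (PySem.Dict.mk L).getD kv.1 []) = L.map Prod.snd := by
  apply List.map_congr_left
  intro kv hkv
  apply PySem.Dict.getD_of_mem_items
  · simpa using hkv
  · simpa [PySem.Dict.keys] using h

theorem pv_zip_get (a0 a1 : List String) (n : Nat) (h1 : n < a0.length) (h2 : n < a1.length) :
    (a0.zip a1)[n]? = some (a0[n], a1[n]) := by
  rw [List.getElem?_eq_getElem (by simp [List.length_zip]; omega)]
  simp [List.getElem_zip]

-- A's inner loop, for one fixed client state x whose matches all lie before the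
-- end of the abbreviation column: it collects the a1-values of the matching
-- rows among the first n zipped rows.
theorem pv_inner_eq (a0 a1 : List String) (x : String)
    (hx : x ∉ a0.drop a1.length) :
    ∀ n : Nat, n ≤ a0.length → ∀ acc : List String,
      (PySem.List.pyRange 0 (n : Int) 1).foldl (fun acc2 j =>
        if x = PySem.List.pyGetD a0 j "" then acc2 ++ [PySem.List.pyGetD a1 j ""] else acc2) acc
      = acc ++ (((a0.zip a1).take n).filter (fun p => p.1 == x)).map (·.2) := by
  intro n
  induction n with
  | zero => intro _ acc; simp [PySem.List.pyRange_one_eq_nil]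
  | succ n ih =>
    intro hn acc
    have hn' : n ≤ a0.length := Nat.le_of_succ_le hn
    have hlt : n < a0.length := hn
    have hcast : ((n + 1 : Nat) : Int) = (n : Int) + 1 := by push_cast; ring
    rw [hcast, PySem.List.pyRange_one_succ_right (by positivity), List.foldl_append, ih hn']
    have hga0 : PySem.List.pyGetD a0 (n : Int) "" = a0[n] := by
      simp [PySem.List.pyGetD_natCast, List.getD_eq_getElem?_getD, hlt]
    simp only [List.foldl_cons, List.foldl_nil, hga0]
    by_cases hm : x = a0[n]
    · have hna1 : n < a1.length := by
        by_contra hge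
        exact hx (hm ▸ List.mem_drop_iff_getElem.mpr ⟨n - a1.length, by omega, by congr 1; omega⟩)
      rw [List.take_add_one, pv_zip_get a0 a1 n hlt hna1]
      have hga1 : PySem.List.pyGetD a1 (n : Int) "" = a1[n] := by
        simp [PySem.List.pyGetD_natCast, List.getD_eq_getElem?_getD, hna1]
      simp [hm, hga1, List.filter_append, List.append_assoc]
    · rw [List.take_add_one]
      rcases hz : (a0.zip a1)[n]? with _ | p
      · simp [hm]
      · have hna1 : n < a1.length := by
          have := (List.getElem?_eq_some_iff.mp hz).1
          simp [List.length_zip] at this; omega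
        rw [pv_zip_get a0 a1 n hlt hna1] at hz
        have hp : p = (a0[n], a1[n]) := (Option.some.inj hz).symm
        have hm2 : ¬ a0[n] = x := fun hq => hm hq.symm
        simp [hm, hm2, hp, List.filter_append]

-- The two LISTA_FI loops agree: A's nested index scan equals B's single pass
-- over the grouping dict.
theorem pv_lista_eq (a0 a1 c0 : List String)
    (h : ∀ v ∈ a0.drop a1.length, v ∉ c0) :
    (PySem.List.pyRange 0 (c0.length : Int) 1).foldl (fun acc i =>
      (PySem.List.pyRange 0 (a0.length : Int) 1).foldl (fun acc2 j =>
        if PySem.List.pyGetD c0 i "" = PySem.List.pyGetD a0 j "" then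
          acc2 ++ [PySem.List.pyGetD a1 j ""] else acc2) acc) []
    = c0.foldl (fun acc estado => acc ++
        ((a0.zip a1).foldl (fun d p => d.modify p.1 [] (· ++ [p.2])) PySem.Dict.empty).getD estado []) [] := by
  rw [PySem.List.foldl_pyRange_zero_pyGetD' c0 ""
    (fun acc x => (PySem.List.pyRange 0 (a0.length : Int) 1).foldl (fun acc2 j =>
        if x = PySem.List.pyGetD a0 j "" then acc2 ++ [PySem.List.pyGetD a1 j ""] else acc2) acc) []]
  apply PySem.List.foldl_congr_mem
  intro acc x hxmem
  have hx : x ∉ a0.drop a1.length := fun hd => h x hd hxmem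
  rw [pv_inner_eq a0 a1 x hx a0.length le_rfl acc,
    List.take_of_length_le (by simp [List.length_zip]),
    PySem.Dict.getD_foldl_modify_append]
  simp [PySem.Dict.getD_empty]

-- ===== VERDICT (by name: the statement is the Claim_ definition above) =====
theorem cambiar_abreviaturas_ventas_spec : Claim_equal_cambiar_abreviaturas_ventas := by
  intro E DC _ hpre
  obtain ⟨hE, hDC, hElen, hDClen, hnm⟩ := hpre
  unfold Spec_cambiar_abreviaturas_ventas cambiar_abreviaturas_ventas cambiar_abreviaturas_ventas_alt
  simp only [PySem.List.foldl_append_singleton_eq_map, pv_cols_eq E hE, pv_cols_eq DC hDC]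
  match E, hElen with
  | e0 :: e1 :: er, _ =>
  match DC, hDClen with
  | c0 :: c1 :: cr, _ =>
  have h1 : PySem.List.pyGetD (e0.2 :: e1.2 :: er.map Prod.snd) 1 ([] : List String) = e1.2 := by
    simp [PySem.List.pyGetD, PySem.List.pyGet?, PySem.List.pyIdx?]
  simp only [List.map_cons, List.nil_append, PySem.List.pyGetD_zero_cons, h1]
  rw [pv_lista_eq e0.2 e1.2 c0.2 hnm]
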